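-- pv_equiv track=rewrite | github.com/fjemi/mono_repo | tests/yml_testing_framework/python/app/cast_data_as.py | get_cast_function_names
-- ===== SOURCE A (Python) =====
-- from typing import List, Any, Dict, Callable
-- from fnmatch import fnmatch
--
-- FUNCTION_NAME_SWITCHER = {
--   'none_to_*': 'case_value_is_none',
--   '*_to_none': 'case_value_to_value',
--   'other_to_other': 'case_cast_no_unpacking',
--   'list|tuple_to_list|tuple': 'case_value_to_value',
--   'dict_to_dict': 'case_value_to_value',
--   'dataclass_to_dict': 'case_basemodel_or_dataclass_to_dict',
--   'dataclass_to_other': 'case_basemodel_or_dataclass_to_other',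
--   'basemodel_to_dict': 'case_basemodel_or_dataclass_to_dict',
--   'basemodel_to_other': 'case_basemodel_or_dataclass_to_other',
--   'dict_to_dataclass': 'case_dict_to_dataclass_or_basemodel',
--   'dict_to_basemodel': 'case_dict_to_dataclass_or_basemodel',
--   'list|tuple_to_dataclass':'case_list_or_tuple_to_dataclass',
--   'list|tuple_to_dict':'case_list_or_tuple_to_dict',
-- }
--
-- def get_cast_function_names(
--   value_and_cast_type_cases: List[str],
--   values_n: int,
-- ) -> List[str]:
--   '''Returns a list of functions used to facilitate casting values to
--   constructor objects. Matches `value_and_cast_type_cases` to the keys of the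
--   `FUNCTION_NAME_SWITCHER` dictionary to determine which function is needed.'''
--   store = []
--   cases = list(FUNCTION_NAME_SWITCHER.keys())
--   functions = list(FUNCTION_NAME_SWITCHER.values())
--   # Iterate over the keys (cases) of the
--   # `FUNCTION_NAME_SWITCHER` dictionary
--   for _case in value_and_cast_type_cases:
--     function = None
--     for i in range(len(cases)):
--       # Determine if the case matches the key at a certain index
--       if fnmatch(_case, cases[i]) is False:
--         continue
--       # Store the function at matching index
--       function = functions[i]
--       break
--     store.append(function)
--   return store
-- ===== SOURCE B (Python) =====
-- from typing import List
--
-- FUNCTION_NAME_SWITCHER = {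
--   'none_to_*': 'case_value_is_none',
--   '*_to_none': 'case_value_to_value',
--   'other_to_other': 'case_cast_no_unpacking',
--   'list|tuple_to_list|tuple': 'case_value_to_value',
--   'dict_to_dict': 'case_value_to_value',
--   'dataclass_to_dict': 'case_basemodel_or_dataclass_to_dict',
--   'dataclass_to_other': 'case_basemodel_or_dataclass_to_other',
--   'basemodel_to_dict': 'case_basemodel_or_dataclass_to_dict',
--   'basemodel_to_other': 'case_basemodel_or_dataclass_to_other',
--   'dict_to_dataclass': 'case_dict_to_dataclass_or_basemodel',
--   'dict_to_basemodel': 'case_dict_to_dataclass_or_basemodel',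
--   'list|tuple_to_dataclass':'case_list_or_tuple_to_dataclass',
--   'list|tuple_to_dict':'case_list_or_tuple_to_dict',
-- }
--
-- # The 12 non-wildcard keys match literally: one hash lookup replaces the scan.
-- _LITERAL_TABLE = {k: v for k, v in FUNCTION_NAME_SWITCHER.items() if '*' not in k}
--
-- def get_cast_function_names(
--   value_and_cast_type_cases: List[str],
--   values_n: int,
-- ):
--   store = []
--   for _case in value_and_cast_type_cases:
--     if _case.startswith('none_to_'):
--       store.append('case_value_is_none')
--     elif _case.endswith('_to_none'):
--       store.append('case_value_to_value')
--     else: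
--       store.append(_LITERAL_TABLE.get(_case))
--   return store
-- ===== Notes on version B (the rewrite author's own statement) =====
-- stated objective: faster
-- what changed: A scans all 14 fnmatch patterns per case; B checks the two wildcard patterns with startswith/endswith and otherwise does one lookup in a precomputed dict of the 12 literal keys.
import Mathlib
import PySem

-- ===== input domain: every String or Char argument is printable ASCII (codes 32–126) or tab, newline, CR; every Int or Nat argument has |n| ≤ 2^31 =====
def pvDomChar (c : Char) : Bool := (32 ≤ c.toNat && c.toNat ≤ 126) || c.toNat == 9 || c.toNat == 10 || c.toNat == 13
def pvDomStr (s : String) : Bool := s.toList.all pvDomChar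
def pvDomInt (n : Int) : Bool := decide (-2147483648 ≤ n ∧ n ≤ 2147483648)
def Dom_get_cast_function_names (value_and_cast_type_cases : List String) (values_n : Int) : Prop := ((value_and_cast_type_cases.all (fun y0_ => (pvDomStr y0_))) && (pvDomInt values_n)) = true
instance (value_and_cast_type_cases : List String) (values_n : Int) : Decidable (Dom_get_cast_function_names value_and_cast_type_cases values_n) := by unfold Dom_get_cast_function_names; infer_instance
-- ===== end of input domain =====

-- B replaces A's 14-pattern linear fnmatch scan per case by two prefix/suffix tests plus one
-- dict lookup over the 12 literal keys (objective: faster, measured; same observable results).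

-- ===== PORT A =====

-- fnmatch(name, pat) on POSIX for patterns without '[' (true of all patterns used here):
-- '*' matches any (possibly empty) run of characters, '?' any single character,
-- every other pattern character matches itself.  Exact for the fixed patterns below.
def globMatch : List Char → List Char → Bool
  | [], [] => true
  | [], _ :: _ => false
  | '*' :: ps, s =>
      globMatch ps s ||
        (match s with
          | [] => false
          | _ :: t => globMatch ('*' :: ps) t)
  | _ :: _, [] => false
  | p :: ps, c :: s => (p == '?' || p == c) && globMatch ps s
termination_by p s => p.length + s.length

def fnmatchB (name pat : String) : Bool := globMatch pat.toList name.toList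

-- FUNCTION_NAME_SWITCHER as its (key, value) pairs in insertion order
def FUNCTION_NAME_SWITCHER : List (String × String) :=
  [ ("none_to_*", "case_value_is_none"),
    ("*_to_none", "case_value_to_value"),
    ("other_to_other", "case_cast_no_unpacking"),
    ("list|tuple_to_list|tuple", "case_value_to_value"),
    ("dict_to_dict", "case_value_to_value"),
    ("dataclass_to_dict", "case_basemodel_or_dataclass_to_dict"),
    ("dataclass_to_other", "case_basemodel_or_dataclass_to_other"),
    ("basemodel_to_dict", "case_basemodel_or_dataclass_to_dict"),
    ("basemodel_to_other", "case_basemodel_or_dataclass_to_other"),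
    ("dict_to_dataclass", "case_dict_to_dataclass_or_basemodel"),
    ("dict_to_basemodel", "case_dict_to_dataclass_or_basemodel"),
    ("list|tuple_to_dataclass", "case_list_or_tuple_to_dataclass"),
    ("list|tuple_to_dict", "case_list_or_tuple_to_dict") ]

-- the inner 'for i in range(len(cases)): … continue … break' loop, walking keys/values in parallel
def aInnerLoop (s : String) : List (String × String) → Option String
  | [] => none
  | (pat, fn) :: rest =>
      if fnmatchB s pat = false then aInnerLoop s rest else some fn

def get_cast_function_names (value_and_cast_type_cases : List String) (values_n : Int) : List (Option String) :=
  value_and_cast_type_cases.foldl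
    (fun store _case => store ++ [aInnerLoop _case FUNCTION_NAME_SWITCHER]) []

-- ===== PORT B =====

-- {k: v for k, v in FUNCTION_NAME_SWITCHER.items() if '*' not in k}
def literalTable : PySem.Dict String String :=
  PySem.Dict.ofList (FUNCTION_NAME_SWITCHER.filter (fun kv => ¬ PySem.Chars.isIn ['*'] kv.1.toList))

def bCase (_case : String) : Option String :=
  if PySem.Str.startswith _case "none_to_" then some "case_value_is_none"
  else if PySem.Str.endswith _case "_to_none" then some "case_value_to_value"
  else literalTable.get? _case

def get_cast_function_names_alt (value_and_cast_type_cases : List String) (values_n : Int) : List (Option String) :=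
  value_and_cast_type_cases.foldl (fun store _case => store ++ [bCase _case]) []

-- ===== PRECONDITION & SPEC =====
def Spec_get_cast_function_names (value_and_cast_type_cases : List String) (values_n : Int) (out : List (Option String)) : Prop := out = get_cast_function_names_alt value_and_cast_type_cases values_n
instance (value_and_cast_type_cases : List String) (values_n : Int) (out : List (Option String)) : Decidable (Spec_get_cast_function_names value_and_cast_type_cases values_n out) := by unfold Spec_get_cast_function_names; infer_instance

-- ===== CLAIM (what is proved, stated in full; the proofs are below) =====
def Claim_equal_get_cast_function_names : Prop := ∀ (value_and_cast_type_cases : List String) (values_n : Int), Dom_get_cast_function_names value_and_cast_type_cases values_n → Spec_get_cast_function_names value_and_cast_type_cases values_n (get_cast_function_names value_and_cast_type_cases values_n)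

-- ===== LEMMAS AND PROOFS =====

set_option maxRecDepth 4000

-- a pattern with no '*' and no '?' matches exactly itself
theorem globMatch_no_special (p s : List Char)
    (h : ∀ c ∈ p, c ≠ '*' ∧ c ≠ '?') : globMatch p s = (p == s) := by
  induction p generalizing s with
  | nil => cases s <;> simp [globMatch]
  | cons c ps ih =>
      have hc := h c (by simp)
      cases s with
      | nil =>
          have h0 : globMatch (c :: ps) [] = false := by
            rw [globMatch.eq_def]; split <;> simp_all
          rw [h0]; simp
      | cons x s' =>
          have h1 : globMatch (c :: ps) (x :: s') =
              ((c == '?' || c == x) && globMatch ps s') := by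
            rw [globMatch.eq_def]; split <;> simp_all
          rw [h1, ih s' (fun d hd => h d (by simp [hd]))]
          have h2 : (c == '?') = false := by simp [hc.2]
          simp [h2, List.cons_beq_cons]

theorem fnmatchB_lit (s k : String)
    (h : ∀ c ∈ k.toList, c ≠ '*' ∧ c ≠ '?') : fnmatchB s k = (k == s) := by
  rw [fnmatchB, globMatch_no_special _ _ h]
  cases hk : k == s with
  | true => simp_all [String.ext_iff]
  | false =>
      simp only [beq_eq_false_iff_ne] at hk ⊢
      intro he
      exact hk (String.ext he)

theorem globMatch_star (s : List Char) : globMatch ['*'] s = true := by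
  induction s with
  | nil => rw [globMatch.eq_def]; simp [globMatch]
  | cons x t ih => rw [globMatch.eq_def]; simp [ih]

-- a literal prefix followed by '*' matches exactly the strings with that prefix
theorem glob_prefix (p s : List Char)
    (h : ∀ c ∈ p, c ≠ '*' ∧ c ≠ '?') :
    globMatch (p ++ ['*']) s = PySem.Chars.startswith s p := by
  induction p generalizing s with
  | nil =>
      simpa [globMatch_star] using
        ((PySem.Chars.startswith_iff s []).2 List.nil_prefix).symm
  | cons c ps ih =>
      have hc := h c (by simp)
      cases s with
      | nil =>
          have h0 : globMatch (c :: (ps ++ ['*'])) [] = false := by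
            rw [globMatch.eq_def]; split <;> simp_all
          rw [List.cons_append, h0, Bool.eq_iff_iff, PySem.Chars.startswith_iff]
          simp
      | cons x s' =>
          have h1 : globMatch (c :: (ps ++ ['*'])) (x :: s') =
              ((c == '?' || c == x) && globMatch (ps ++ ['*']) s') := by
            rw [globMatch.eq_def]; split <;> simp_all
          rw [List.cons_append, h1, ih s' (fun d hd => h d (by simp [hd]))]
          have h2 : (c == '?') = false := by simp [hc.2]
          rw [Bool.eq_iff_iff]
          simp [h2, PySem.Chars.startswith_iff, List.cons_prefix_cons]

-- '*' followed by a literal suffix matches exactly the strings with that suffix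
theorem glob_suffix (p s : List Char)
    (h : ∀ c ∈ p, c ≠ '*' ∧ c ≠ '?') :
    globMatch ('*' :: p) s = PySem.Chars.endswith s p := by
  induction s with
  | nil =>
      rw [globMatch.eq_def]
      simp only []
      rw [globMatch_no_special p [] h, Bool.eq_iff_iff, PySem.Chars.endswith_iff]
      simp
  | cons x t ih =>
      rw [globMatch.eq_def]
      simp only []
      rw [globMatch_no_special p (x :: t) h, ih, Bool.eq_iff_iff]
      simp [PySem.Chars.endswith_iff, List.suffix_cons_iff]

theorem fnmatchB_prefix_star (s : String) :
    fnmatchB s "none_to_*" = PySem.Str.startswith s "none_to_" := by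
  have hl : "none_to_*".toList = "none_to_".toList ++ ['*'] := by simp
  rw [fnmatchB, hl, glob_prefix _ _ (by simp), PySem.Str.startswith]

theorem fnmatchB_star_suffix (s : String) :
    fnmatchB s "*_to_none" = PySem.Str.endswith s "_to_none" := by
  have hl : "*_to_none".toList = '*' :: "_to_none".toList := by simp
  rw [fnmatchB, hl, glob_suffix _ _ (by simp), PySem.Str.endswith]

theorem inner_eq (s : String) : aInnerLoop s FUNCTION_NAME_SWITCHER = bCase s := by
  have hitems : literalTable.items =
    [ ("other_to_other", "case_cast_no_unpacking"),
      ("list|tuple_to_list|tuple", "case_value_to_value"),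
      ("dict_to_dict", "case_value_to_value"),
      ("dataclass_to_dict", "case_basemodel_or_dataclass_to_dict"),
      ("dataclass_to_other", "case_basemodel_or_dataclass_to_other"),
      ("basemodel_to_dict", "case_basemodel_or_dataclass_to_dict"),
      ("basemodel_to_other", "case_basemodel_or_dataclass_to_other"),
      ("dict_to_dataclass", "case_dict_to_dataclass_or_basemodel"),
      ("dict_to_basemodel", "case_dict_to_dataclass_or_basemodel"),
      ("list|tuple_to_dataclass", "case_list_or_tuple_to_dataclass"),
      ("list|tuple_to_dict", "case_list_or_tuple_to_dict") ] := by decide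
  simp only [FUNCTION_NAME_SWITCHER, aInnerLoop, bCase,
    PySem.Dict.get?, hitems, List.find?]
  rw [fnmatchB_lit s "other_to_other" (by simp),
    fnmatchB_lit s "list|tuple_to_list|tuple" (by simp),
    fnmatchB_lit s "dict_to_dict" (by simp),
    fnmatchB_lit s "dataclass_to_dict" (by simp),
    fnmatchB_lit s "dataclass_to_other" (by simp),
    fnmatchB_lit s "basemodel_to_dict" (by simp),
    fnmatchB_lit s "basemodel_to_other" (by simp),
    fnmatchB_lit s "dict_to_dataclass" (by simp),
    fnmatchB_lit s "dict_to_basemodel" (by simp),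
    fnmatchB_lit s "list|tuple_to_dataclass" (by simp),
    fnmatchB_lit s "list|tuple_to_dict" (by simp)]
  rw [fnmatchB_prefix_star, fnmatchB_star_suffix]
  cases PySem.Str.startswith s "none_to_" <;> cases PySem.Str.endswith s "_to_none" <;> simp
  by_cases e1 : "other_to_other" = s
  · simp [e1]
  have b1 : ("other_to_other" == s) = false := by simp [e1]
  simp only [if_neg e1, b1]
  by_cases e2 : "list|tuple_to_list|tuple" = s
  · simp [e2]
  have b2 : ("list|tuple_to_list|tuple" == s) = false := by simp [e2]
  simp only [if_neg e2, b2]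
  by_cases e3 : "dict_to_dict" = s
  · simp [e3]
  have b3 : ("dict_to_dict" == s) = false := by simp [e3]
  simp only [if_neg e3, b3]
  by_cases e4 : "dataclass_to_dict" = s
  · simp [e4]
  have b4 : ("dataclass_to_dict" == s) = false := by simp [e4]
  simp only [if_neg e4, b4]
  by_cases e5 : "dataclass_to_other" = s
  · simp [e5]
  have b5 : ("dataclass_to_other" == s) = false := by simp [e5]
  simp only [if_neg e5, b5]
  by_cases e6 : "basemodel_to_dict" = s
  · simp [e6]
  have b6 : ("basemodel_to_dict" == s) = false := by simp [e6]
  simp only [if_neg e6, b6]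
  by_cases e7 : "basemodel_to_other" = s
  · simp [e7]
  have b7 : ("basemodel_to_other" == s) = false := by simp [e7]
  simp only [if_neg e7, b7]
  by_cases e8 : "dict_to_dataclass" = s
  · simp [e8]
  have b8 : ("dict_to_dataclass" == s) = false := by simp [e8]
  simp only [if_neg e8, b8]
  by_cases e9 : "dict_to_basemodel" = s
  · simp [e9]
  have b9 : ("dict_to_basemodel" == s) = false := by simp [e9]
  simp only [if_neg e9, b9]
  by_cases e10 : "list|tuple_to_dataclass" = s
  · simp [e10]
  have b10 : ("list|tuple_to_dataclass" == s) = false := by simp [e10]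
  simp only [if_neg e10, b10]
  by_cases e11 : "list|tuple_to_dict" = s
  · simp [e11]
  have b11 : ("list|tuple_to_dict" == s) = false := by simp [e11]
  simp only [if_neg e11, b11]
  rfl

-- ===== VERDICT (by name: the statement is the Claim_ definition above) =====
theorem get_cast_function_names_spec : Claim_equal_get_cast_function_names := by
  intro cases_ n _
  unfold Spec_get_cast_function_names get_cast_function_names get_cast_function_names_alt
  have : (fun (store : List (Option String)) (_case : String) =>
      store ++ [aInnerLoop _case FUNCTION_NAME_SWITCHER]) =
      (fun store _case => store ++ [bCase _case]) := by
    funext store c; rw [inner_eq]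
  rw [this]
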